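-- pv_equiv track=rewrite | github.com/durandal42/projects | enclose.horse/horse.py | print_grid
-- ===== SOURCE A (Python) =====
-- def print_grid(grid, paint={}):
--   result = []
--   for r, row in enumerate(grid):
--     for c, char in enumerate(row):
--       for color, targets in paint.items():
--         if (r, c) in targets:
--           result.append(color)
--           break
--       else:
--         result.append(char)
--     result.append("\n")
--   return "".join(result)
-- ===== SOURCE B (Python) =====
-- def print_grid(grid, paint={}):
--   overrides = {}
--   for color, targets in paint.items():
--     for pos in targets:
--       if pos not in overrides:
--         overrides[pos] = color
--   return ''.join(
--       ''.join(overrides.get((r, c), ch) for c, ch in enumerate(row)) + '\n'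
--       for r, row in enumerate(grid))
-- ===== Notes on version B (the rewrite author's own statement) =====
-- stated objective: faster
-- what changed: B builds a first-wins override dict by one pass over the paint targets, then renders each cell with a single dict lookup, instead of A's per-cell linear scan of every paint entry's target list.
import Mathlib
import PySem

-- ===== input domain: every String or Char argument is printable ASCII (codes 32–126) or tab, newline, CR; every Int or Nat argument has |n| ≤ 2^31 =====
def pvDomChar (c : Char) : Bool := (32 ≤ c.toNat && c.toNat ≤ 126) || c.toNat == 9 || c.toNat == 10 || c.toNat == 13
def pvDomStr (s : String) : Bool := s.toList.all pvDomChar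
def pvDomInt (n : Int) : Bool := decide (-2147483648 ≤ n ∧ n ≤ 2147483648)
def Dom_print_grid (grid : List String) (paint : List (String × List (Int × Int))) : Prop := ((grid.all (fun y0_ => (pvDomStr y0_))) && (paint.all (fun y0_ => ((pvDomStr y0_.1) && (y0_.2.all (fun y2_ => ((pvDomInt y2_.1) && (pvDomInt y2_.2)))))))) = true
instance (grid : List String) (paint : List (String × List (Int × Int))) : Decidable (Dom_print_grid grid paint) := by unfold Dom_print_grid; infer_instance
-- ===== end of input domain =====

-- B is faster: it builds a first-wins override dictionary in one pass over the paint
-- targets and renders each cell with one lookup, instead of A's per-cell scan of paint.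

-- ===== PORT A =====
-- the inner 'for color, targets in paint.items(): if (r,c) in targets: append(color); break / else: append(char)'
def pgFindColor : List (String × List (Int × Int)) → Int → Int → Char → String
  | [], _, _, char => String.mk [char]
  | (color, targets) :: rest, r, c, char =>
    if (r, c) ∈ targets then color else pgFindColor rest r c char

def print_grid (grid : List String) (paint : List (String × List (Int × Int))) : String :=
  let result : List String :=
    (PySem.List.enumerate grid).foldl (fun result rp =>
      ((PySem.List.enumerate rp.2.toList).foldl (fun result cp =>
        result ++ [pgFindColor paint rp.1 cp.1 cp.2]) result) ++ ["\n"]) []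
  String.join result

-- ===== PORT B =====
def print_grid_alt (grid : List String) (paint : List (String × List (Int × Int))) : String :=
  let overrides : PySem.Dict (Int × Int) String :=
    paint.foldl (fun d ct =>
      ct.2.foldl (fun d pos => if d.contains pos then d else d.insert pos ct.1) d)
      PySem.Dict.empty
  String.join ((PySem.List.enumerate grid).map (fun rp =>
    String.join ((PySem.List.enumerate rp.2.toList).map (fun cp =>
      overrides.getD (rp.1, cp.1) (String.mk [cp.2]))) ++ "\n"))

-- ===== PRECONDITION & SPEC =====
def Spec_print_grid (grid : List String) (paint : List (String × List (Int × Int))) (out : String) : Prop := out = print_grid_alt grid paint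
instance (grid : List String) (paint : List (String × List (Int × Int))) (out : String) : Decidable (Spec_print_grid grid paint out) := by unfold Spec_print_grid; infer_instance

-- ===== CLAIM (what is proved, stated in full; the proofs are below) =====
def Claim_equal_print_grid : Prop := ∀ (grid : List String) (paint : List (String × List (Int × Int))), Dom_print_grid grid paint → Spec_print_grid grid paint (print_grid grid paint)

-- ===== LEMMAS AND PROOFS =====

-- first colour in paint (insertion order) whose target list contains p, if any
def pgFind? : List (String × List (Int × Int)) → (Int × Int) → Option String
  | [], _ => none
  | (color, targets) :: rest, p => if p ∈ targets then some color else pgFind? rest p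

lemma pgFindColor_eq_find? (paint : List (String × List (Int × Int))) (r c : Int) (ch : Char) :
    pgFindColor paint r c ch = (pgFind? paint (r, c)).getD (String.mk [ch]) := by
  induction paint with
  | nil => rfl
  | cons hd tl ih =>
    obtain ⟨color, targets⟩ := hd
    simp only [pgFindColor, pgFind?]
    split_ifs <;> simp [ih]

lemma get?_foldl_targets (targets : List (Int × Int)) (color : String)
    (d : PySem.Dict (Int × Int) String) (p : Int × Int) :
    (targets.foldl (fun d pos => if d.contains pos then d else d.insert pos color) d).get? p
      = if (d.get? p).isSome then d.get? p
        else if p ∈ targets then some color else none := by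
  induction targets generalizing d with
  | nil => cases h : d.get? p <;> simp [h]
  | cons t ts ih =>
    simp only [List.foldl_cons]
    by_cases hc : d.contains t = true
    · rw [if_pos hc, ih]
      by_cases hs : (d.get? p).isSome
      · simp [hs]
      · have hpt : p ≠ t := by
          intro h; subst h
          rw [PySem.Dict.contains_eq_isSome_get?] at hc
          exact hs hc
        simp [hs, List.mem_cons, hpt]
    · rw [if_neg hc, ih]
      have hdt : d.get? t = none := by
        rw [PySem.Dict.contains_eq_isSome_get?] at hc
        exact Option.not_isSome_iff_eq_none.mp (by simpa using hc)
      by_cases hpt : p = t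
      · subst hpt
        simp [hdt]
      · rw [PySem.Dict.get?_insert]
        simp [hpt, List.mem_cons]
  
lemma get?_build (paint : List (String × List (Int × Int)))
    (d : PySem.Dict (Int × Int) String) (p : Int × Int) :
    (paint.foldl (fun d ct =>
        ct.2.foldl (fun d pos => if d.contains pos then d else d.insert pos ct.1) d) d).get? p
      = if (d.get? p).isSome then d.get? p else pgFind? paint p := by
  induction paint generalizing d with
  | nil => cases h : d.get? p <;> simp [pgFind?, h]
  | cons hd tl ih =>
    obtain ⟨color, targets⟩ := hd
    simp only [List.foldl_cons, ih, get?_foldl_targets, pgFind?]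
    by_cases hs : (d.get? p).isSome
    · simp [hs]
    · by_cases hm : p ∈ targets <;> simp [hs, hm]

lemma sfoldl (l : List String) (s : String) : l.foldl (· ++ ·) s = s ++ String.join l := by
  induction l generalizing s with
  | nil => exact String.append_empty.symm
  | cons x xs ih =>
    have h1 : (x :: xs).foldl (· ++ ·) s = xs.foldl (· ++ ·) (s ++ x) := rfl
    have h2 : String.join (x :: xs) = xs.foldl (· ++ ·) ("" ++ x) := rfl
    rw [h1, ih, h2, ih, String.empty_append, String.append_assoc]

lemma join_append (a b : List String) : String.join (a ++ b) = String.join a ++ String.join b := by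
  have h : String.join (a ++ b) = (a ++ b).foldl (· ++ ·) "" := rfl
  rw [h, List.foldl_append, sfoldl]
  rfl

lemma join_cons (x : String) (xs : List String) : String.join (x :: xs) = x ++ String.join xs := by
  have h2 : String.join (x :: xs) = xs.foldl (· ++ ·) ("" ++ x) := rfl
  rw [h2, sfoldl, String.empty_append]

lemma join_flatMap {α : Type} (l : List α) (g : α → List String) :
    String.join (l.flatMap g) = String.join (l.map (fun x => String.join (g x))) := by
  induction l with
  | nil => rfl
  | cons x xs ih => rw [List.flatMap_cons, join_append, ih, List.map_cons, join_cons]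

-- ===== VERDICT (by name: the statement is the Claim_ definition above) =====
theorem print_grid_spec : Claim_equal_print_grid := by
  intro grid paint _
  unfold Spec_print_grid print_grid print_grid_alt
  simp only [PySem.List.foldl_append_singleton_eq_map, List.append_assoc]
  rw [PySem.List.foldl_append_eq_flatMap, List.nil_append, join_flatMap]
  congr 1
  apply List.map_congr_left
  intro rp _
  rw [join_append]
  congr 1
  · congr 1
    apply List.map_congr_left
    intro cp _
    rw [pgFindColor_eq_find?, PySem.Dict.getD_eq_get?_getD, get?_build]
    simp [PySem.Dict.get?_empty]
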